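-- pv_equiv track=rewrite | github.com/benjaminarjun/AdventOfCode2020 | solutions/day5/results.py | _get_dim_pos
-- ===== SOURCE A (Python) =====
-- def _get_dim_pos(sub_instruction, val_map):
--     initial_size = 2 ** len(sub_instruction)
--     current_pos = 0
--     next_partition_size = initial_size // 2
--
--     for char in sub_instruction:
--         if val_map[char] == 1:
--             current_pos += next_partition_size
--
--         next_partition_size = next_partition_size // 2
--
--     return current_pos
-- ===== SOURCE B (Python) =====
-- def _get_dim_pos(sub_instruction, val_map):
--     bits = ''.join('1' if val_map[char] == 1 else '0' for char in sub_instruction)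
--     return int(bits, 2) if bits else 0
-- ===== Notes on version B (the rewrite author's own statement) =====
-- stated objective: idiomatic
-- what changed: Replaces the running-partition-size accumulator loop with a two-phase map-to-bitstring then base-2 parse (Horner evaluation), guarding the empty string with 0.
import Mathlib
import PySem

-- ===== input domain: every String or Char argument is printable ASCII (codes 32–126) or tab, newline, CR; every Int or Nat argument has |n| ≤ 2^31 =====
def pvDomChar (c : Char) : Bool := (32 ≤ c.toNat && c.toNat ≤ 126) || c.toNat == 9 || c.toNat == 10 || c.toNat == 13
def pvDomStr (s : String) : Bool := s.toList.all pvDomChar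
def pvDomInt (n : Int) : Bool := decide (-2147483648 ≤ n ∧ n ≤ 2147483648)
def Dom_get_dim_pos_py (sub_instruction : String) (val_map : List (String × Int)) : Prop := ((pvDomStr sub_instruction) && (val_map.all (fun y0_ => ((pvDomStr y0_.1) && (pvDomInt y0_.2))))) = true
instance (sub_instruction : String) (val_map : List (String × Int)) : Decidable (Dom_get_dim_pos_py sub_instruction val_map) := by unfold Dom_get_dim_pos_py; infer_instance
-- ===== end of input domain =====

-- B replaces the running partition-size accumulator with map-to-bitstring then base-2 Horner parse (idiomatic decomposition; same cost).

-- ===== PORT A =====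
-- loop state: (current_pos, next_partition_size); val_map[char] → Dict.get?; Pre_ guarantees isSome, getD 0 stands for the KeyError case excluded by Pre_
def get_dim_pos_py (sub_instruction : String) (val_map : List (String × Int)) : Int :=
  let initial_size : Int := 2 ^ sub_instruction.length
  let r := sub_instruction.toList.foldl
    (fun (st : Int × Int) c =>
      ((if ((PySem.Dict.mk val_map).get? (String.ofList [c])).getD 0 = 1 then st.1 + st.2 else st.1),
       PySem.Int.floordiv st.2 2))
    (0, PySem.Int.floordiv initial_size 2)
  r.1

-- ===== PORT B =====
-- phase 1: map each char to a bit char; phase 2: int(bits, 2) ported as the standard base-2 Horner fold (exact for '0'/'1' strings)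
def get_dim_pos_py_alt (sub_instruction : String) (val_map : List (String × Int)) : Int :=
  let bits : List Char := sub_instruction.toList.map
    (fun c => if ((PySem.Dict.mk val_map).get? (String.ofList [c])).getD 0 = 1 then '1' else '0')
  if bits.isEmpty then 0
  else bits.foldl (fun (acc : Int) b => 2 * acc + (if b = '1' then 1 else 0)) 0

-- ===== PRECONDITION & SPEC =====
-- Pre_ excludes exactly the inputs where some character of sub_instruction is missing from val_map (Python raises KeyError in both A and B)
def Pre_get_dim_pos_py (sub_instruction : String) (val_map : List (String × Int)) : Prop :=
  sub_instruction.toList.all (fun c => ((PySem.Dict.mk val_map).get? (String.ofList [c])).isSome) = true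
instance (sub_instruction : String) (val_map : List (String × Int)) : Decidable (Pre_get_dim_pos_py sub_instruction val_map) := by unfold Pre_get_dim_pos_py; infer_instance

def pvWitness_get_dim_pos_py : String × (List (String × Int)) := ("FBB", [("F", 0), ("B", 1)])

def Spec_get_dim_pos_py (sub_instruction : String) (val_map : List (String × Int)) (out : Int) : Prop := out = get_dim_pos_py_alt sub_instruction val_map
instance (sub_instruction : String) (val_map : List (String × Int)) (out : Int) : Decidable (Spec_get_dim_pos_py sub_instruction val_map out) := by unfold Spec_get_dim_pos_py; infer_instance

-- ===== CLAIM (what is proved, stated in full; the proofs are below) =====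
def Claim_equal_get_dim_pos_py : Prop := ∀ (sub_instruction : String) (val_map : List (String × Int)), Dom_get_dim_pos_py sub_instruction val_map → Pre_get_dim_pos_py sub_instruction val_map → Spec_get_dim_pos_py sub_instruction val_map (get_dim_pos_py sub_instruction val_map)

-- ===== LEMMAS AND PROOFS =====

-- Horner shift: prepending a start value a multiplies it by 2^|l|
theorem horner_shift (bit : Char → Int) (l : List Char) :
    ∀ a : Int, l.foldl (fun acc b => 2 * acc + bit b) a
      = a * 2 ^ l.length + l.foldl (fun acc b => 2 * acc + bit b) 0 := by
  induction l with
  | nil => intro a; simp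
  | cons c t ih =>
    intro a
    simp only [List.foldl_cons, List.length_cons]
    rw [ih (2 * a + bit c), ih (2 * 0 + bit c)]
    ring

theorem fdiv_pow_two (n : ℕ) : PySem.Int.floordiv ((2 : Int) ^ (n + 1)) 2 = 2 ^ n := by
  simp [PySem.Int.floordiv, pow_succ, Int.mul_fdiv_cancel _ (by norm_num : (2:Int) ≠ 0)]

-- the A-loop starting from (p, 2^|l| // 2) computes p + the Horner value of l's bits
theorem loop_eq_horner (f : Char → Prop) [DecidablePred f] (l : List Char) :
    ∀ p : Int,
      (l.foldl (fun (st : Int × Int) c =>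
          ((if f c then st.1 + st.2 else st.1), PySem.Int.floordiv st.2 2))
        (p, PySem.Int.floordiv ((2 : Int) ^ l.length) 2)).1
      = p + (l.map (fun c => if f c then '1' else '0')).foldl
              (fun acc b => 2 * acc + (if b = '1' then 1 else 0)) 0 := by
  induction l with
  | nil => intro p; simp
  | cons c t ih =>
    intro p
    simp only [List.length_cons, List.foldl_cons, List.map_cons]
    rw [fdiv_pow_two]
    rw [ih (if f c then p + 2 ^ t.length else p)]
    rw [horner_shift _ (t.map (fun c => if f c then '1' else '0'))
          (2 * 0 + (if (if f c then '1' else '0') = '1' then 1 else 0))]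
    simp only [List.length_map]
    by_cases h : f c
    · simp only [if_pos h]; simp; ring
    · simp only [if_neg h]; simp

-- ===== VERDICT (by name: the statement is the Claim_ definition above) =====
theorem get_dim_pos_py_spec : Claim_equal_get_dim_pos_py := by
  intro s vm _ _
  unfold Spec_get_dim_pos_py get_dim_pos_py get_dim_pos_py_alt
  have hlen : s.length = s.toList.length := rfl
  simp only [hlen]
  rw [loop_eq_horner (fun c => ((PySem.Dict.mk vm).get? (String.ofList [c])).getD 0 = 1) s.toList 0]
  cases h : s.toList with
  | nil => simp [h]
  | cons a t => simp
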